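-- pv_equiv track=rewrite | github.com/gurmehakk/DCLL-NEW | hangman/test.py | get_partial_pattern
-- ===== SOURCE A (Python) =====
-- def get_partial_pattern(clean_word):
--     """Get pattern for partial word"""
--     char_map = {}
--     pattern = []
--     next_num = 1
--     for char in clean_word:
--         if char == '.':
--             pattern.append('?')
--         else:
--             if char not in char_map:
--                 char_map[char] = next_num
--                 next_num += 1
--             pattern.append(str(char_map[char]))
--     return ''.join(pattern)
-- ===== SOURCE B (Python) =====
-- def get_partial_pattern(clean_word):
--     """Get pattern for partial word"""
--     def num(c):
--         # rank of c = 1 + number of distinct non-'.' characters strictly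
--         # before c's first occurrence
--         return len({d for d in clean_word[:clean_word.index(c)] if d != '.'}) + 1
--     return ''.join('?' if c == '.' else str(num(c)) for c in clean_word)
-- ===== Notes on version B (the rewrite author's own statement) =====
-- stated objective: alternative
-- what changed: Discards A's incrementally maintained dict and running counter entirely: B computes each character's number by a per-character closed form -- 1 + the size of the set of non-'.' characters in the prefix before that character's first occurrence -- so no mapping state is threaded through any loop.
import Mathlib
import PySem

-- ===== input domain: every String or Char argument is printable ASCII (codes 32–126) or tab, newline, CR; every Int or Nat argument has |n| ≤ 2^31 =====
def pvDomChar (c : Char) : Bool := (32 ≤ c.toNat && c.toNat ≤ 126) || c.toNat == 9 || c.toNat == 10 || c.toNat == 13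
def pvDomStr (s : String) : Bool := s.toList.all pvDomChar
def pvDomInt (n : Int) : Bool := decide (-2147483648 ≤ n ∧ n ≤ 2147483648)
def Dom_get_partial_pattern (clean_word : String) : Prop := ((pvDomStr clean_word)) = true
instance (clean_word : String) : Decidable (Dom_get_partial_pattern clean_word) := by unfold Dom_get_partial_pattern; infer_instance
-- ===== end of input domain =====

-- B replaces A's stateful dict+counter loop by a per-character closed form: 1 + the number of
-- distinct non-'.' chars in the prefix before the char's first occurrence (objective: alternative).

-- ===== PORT A =====
-- One loop iteration of A: state (char_map, pattern, next_num).
-- char_map[char] after the conditional insert is always present; the none branch of get? is unreachable.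
def gppA_step (st : PySem.Dict Char Int × List String × Int) (c : Char) :
    PySem.Dict Char Int × List String × Int :=
  match st with
  | (m, pat, n) =>
    if c = '.' then (m, pat ++ ["?"], n)
    else
      let mn := if m.contains c then (m, n) else (m.insert c n, n + 1)
      (mn.1, pat ++ [match mn.1.get? c with
                     | some v => PySem.Int.toStr v
                     | none => ""], mn.2)

def get_partial_pattern (clean_word : String) : String :=
  PySem.Str.join "" (clean_word.toList.foldl gppA_step (PySem.Dict.empty, ([] : List String), 1)).2.1

-- ===== PORT B =====
-- clean_word.index(c) on a 1-char string = first index of the char in the char list;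
-- it never raises for the chars it is applied to (they come from clean_word): the none branch is unreachable.
-- {d for d in clean_word[:i] if d != '.'} is PySem.Set.ofList of the filtered slice; len(...) is Set.len.
def gppB_item (xs : List Char) (c : Char) : String :=
  if c = '.' then "?"
  else
    match PySem.List.index? xs c with
    | some i =>
        PySem.Int.toStr
          ((PySem.Set.len
              (PySem.Set.ofList
                ((PySem.List.slice xs none (some (i : Int))).filter (fun d => d ≠ '.'))) : Int) + 1)
    | none => ""

def get_partial_pattern_alt (clean_word : String) : String :=
  PySem.Str.join "" (clean_word.toList.map (gppB_item clean_word.toList))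

-- ===== PRECONDITION & SPEC =====
def Spec_get_partial_pattern (clean_word : String) (out : String) : Prop := out = get_partial_pattern_alt clean_word
instance (clean_word : String) (out : String) : Decidable (Spec_get_partial_pattern clean_word out) := by unfold Spec_get_partial_pattern; infer_instance

-- ===== CLAIM (what is proved, stated in full; the proofs are below) =====
def Claim_equal_get_partial_pattern : Prop := ∀ (clean_word : String), Dom_get_partial_pattern clean_word → Spec_get_partial_pattern clean_word (get_partial_pattern clean_word)

-- ===== LEMMAS AND PROOFS =====

-- Reference item: number a char by its index in the ordered dedup of the non-'.' chars.
-- A's fold is proved equal to mapping this item; then it is proved equal pointwise to gppB_item.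
def gppRef_item (order : List Char) (c : Char) : String :=
  if c = '.' then "?"
  else match PySem.List.index? order c with
       | some i => PySem.Int.toStr ((i : Int) + 1)
       | none => ""

lemma gppA_step_dot (m : PySem.Dict Char Int) (pat : List String) (n : Int) :
    gppA_step (m, pat, n) '.' = (m, pat ++ ["?"], n) := by
  simp [gppA_step]

lemma gppA_step_mem {c : Char} (hc : c ≠ '.') {m : PySem.Dict Char Int}
    (hcon : m.contains c = true) {v : Int} (hget : m.get? c = some v)
    (pat : List String) (n : Int) :
    gppA_step (m, pat, n) c = (m, pat ++ [PySem.Int.toStr v], n) := by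
  simp [gppA_step, hc, hcon, hget]

lemma gppA_step_new {c : Char} (hc : c ≠ '.') {m : PySem.Dict Char Int}
    (hcon : m.contains c = false) (pat : List String) (n : Int) :
    gppA_step (m, pat, n) c = (m.insert c n, pat ++ [PySem.Int.toStr n], n + 1) := by
  simp [gppA_step, hc, hcon, PySem.Dict.get?_insert_self]

lemma index?_update_of_mem {p : List Char} (rest : List Char) {c : Char} (h : c ∈ p) :
    PySem.List.index? (PySem.Set.update p rest) c = PySem.List.index? p c := by
  rw [PySem.Set.update_eq_append_filter, PySem.List.index?_append_of_mem _ h]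

lemma index?_append_singleton_of_ne {p : List Char} {c c' : Char} (h : c' ≠ c) :
    PySem.List.index? (p ++ [c]) c' = PySem.List.index? p c' := by
  by_cases hm : c' ∈ p
  · exact PySem.List.index?_append_of_mem _ hm
  · rw [(PySem.List.index?_eq_none_iff _ _).2 hm,
        (PySem.List.index?_eq_none_iff _ _).2 (by simp [List.mem_append, hm, h])]

lemma gpp_loop (cs : List Char) : ∀ (p : List Char) (m : PySem.Dict Char Int) (acc : List String),
    p.Nodup →
    (∀ c, m.get? c = (PySem.List.index? p c).map (fun i : Nat => ((i : Int) + 1))) →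
    (cs.foldl gppA_step (m, acc, (p.length : Int) + 1)).2.1
      = acc ++ cs.map (gppRef_item (PySem.Set.update p (cs.filter (fun c => c ≠ '.')))) := by
  induction cs with
  | nil => intro p m acc _ _; simp
  | cons c cs ih =>
    intro p m acc hnd hinv
    by_cases hc : c = '.'
    · subst hc
      rw [List.foldl_cons, gppA_step_dot, List.filter_cons_of_neg (by simp),
          ih p m _ hnd hinv]
      simp [gppRef_item]
    · have hfc : (c :: cs).filter (fun c => c ≠ '.') = c :: cs.filter (fun c => c ≠ '.') :=
        List.filter_cons_of_pos (by simp [hc])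
      by_cases hm : c ∈ p
      · obtain ⟨i, hi⟩ :=
          Option.isSome_iff_exists.1 ((PySem.List.index?_isSome_iff p c).2 hm)
        have hget : m.get? c = some ((i : Int) + 1) := by rw [hinv c, hi]; rfl
        have hcon : m.contains c = true := by
          rw [PySem.Dict.contains_eq_isSome_get?, hget]; rfl
        rw [List.foldl_cons, gppA_step_mem hc hcon hget, ih p m _ hnd hinv,
            hfc, PySem.Set.update_cons, PySem.Set.add_of_mem hm]
        simp only [List.map_cons, gppRef_item, if_neg hc, index?_update_of_mem _ hm, hi,
          List.append_assoc, List.cons_append, List.nil_append]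
      · have hget : m.get? c = none := by
          rw [hinv c, (PySem.List.index?_eq_none_iff _ _).2 hm]; rfl
        have hcon : m.contains c = false := by
          rw [PySem.Dict.contains_eq_isSome_get?, hget]; rfl
        have hnd' : (p ++ [c]).Nodup := by
          simp [List.nodup_append, hnd]
          intro a ha heq
          exact hm (heq ▸ ha)
        have hinv' : ∀ c', (m.insert c ((p.length : Int) + 1)).get? c'
            = (PySem.List.index? (p ++ [c]) c').map (fun i : Nat => ((i : Int) + 1)) := by
          intro c'
          by_cases hcc : c' = c
          · subst hcc
            rw [PySem.Dict.get?_insert_self, PySem.List.index?_append_singleton_self _ _ hm]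
            rfl
          · rw [PySem.Dict.get?_insert_of_ne _ _ hcc, index?_append_singleton_of_ne hcc, hinv c']
        have hlen : (p.length : Int) + 1 + 1 = (((p ++ [c]).length : Int)) + 1 := by
          simp [List.length_append]
        rw [List.foldl_cons, gppA_step_new hc hcon, hlen,
            ih (p ++ [c]) _ _ hnd' hinv',
            hfc, PySem.Set.update_cons, PySem.Set.add_of_not_mem hm]
        have hidx : PySem.List.index?
            (PySem.Set.update (p ++ [c]) (cs.filter (fun c => c ≠ '.'))) c = some p.length := by
          rw [index?_update_of_mem _ (by simp), PySem.List.index?_append_singleton_self _ _ hm]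
        simp only [List.map_cons, gppRef_item, if_neg hc, hidx, List.append_assoc,
          List.cons_append, List.nil_append]

-- The closed form equals the dedup-index: the index of c in the dedup of the non-'.' chars
-- is the number of distinct non-'.' chars strictly before c's first occurrence.
lemma ref_eq_B (xs : List Char) {c : Char} (hmem : c ∈ xs) :
    gppRef_item (PySem.List.dedup (xs.filter (fun d => d ≠ '.'))) c = gppB_item xs c := by
  by_cases hc : c = '.'
  · simp [gppRef_item, gppB_item, hc]
  · obtain ⟨i, hi⟩ :=
      Option.isSome_iff_exists.1 ((PySem.List.index?_isSome_iff xs c).2 hmem)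
    obtain ⟨pre, suf, hxs, hlen, hpre⟩ := (PySem.List.index?_eq_some_iff xs c i).1 hi
    have htake : PySem.List.slice xs none (some (i : Int)) = pre := by
      rw [PySem.List.slice_to_natCast, hxs, ← hlen, List.take_left]
    have hfilter : xs.filter (fun d => d ≠ '.') =
        pre.filter (fun d => d ≠ '.') ++ c :: suf.filter (fun d => d ≠ '.') := by
      rw [hxs, List.filter_append, List.filter_cons_of_pos (by simp [hc])]
    set U : List Char := PySem.Set.ofList (pre.filter (fun d => d ≠ '.')) with hU
    have hcU : c ∉ U := by
      intro h
      exact hpre (List.mem_of_mem_filter ((PySem.Set.mem_ofList _ _).1 h))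
    have hded : PySem.List.dedup (xs.filter (fun d => d ≠ '.')) =
        PySem.Set.update (U ++ [c]) (suf.filter (fun d => d ≠ '.')) := by
      rw [PySem.List.dedup_eq_ofList, hfilter, PySem.Set.ofList_eq_foldl, List.foldl_append,
          List.foldl_cons, ← PySem.Set.ofList_eq_foldl, ← hU]
      have : PySem.Set.add U c = U ++ [c] := PySem.Set.add_of_not_mem hcU
      rw [show (PySem.Set.add U c) = U ++ [c] from this]
      rfl
    have hidx : PySem.List.index? (PySem.List.dedup (xs.filter (fun d => d ≠ '.'))) c
        = some U.length := by
      rw [hded, index?_update_of_mem _ (by simp),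
          PySem.List.index?_append_singleton_self _ _ hcU]
    simp only [gppRef_item, gppB_item, if_neg hc, hidx, hi, htake, hU, PySem.Set.len]

-- ===== VERDICT (by name: the statement is the Claim_ definition above) =====
theorem get_partial_pattern_spec : Claim_equal_get_partial_pattern := by
  intro s _
  unfold Spec_get_partial_pattern get_partial_pattern get_partial_pattern_alt
  have h := gpp_loop s.toList [] PySem.Dict.empty [] List.nodup_nil
    (by intro c; rw [PySem.Dict.get?_empty]; rfl)
  simp only [List.length_nil, Nat.cast_zero, zero_add, List.nil_append] at h
  rw [h, PySem.Set.update_nil_left, ← PySem.List.dedup_eq_ofList]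
  exact congrArg _ (List.map_congr_left (fun c hc => ref_eq_B s.toList hc))
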